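-- pv_equiv track=rewrite | github.com/JPN514/Miscellaneous | small problems/arrow problem.py | solution
-- ===== SOURCE A (Python) =====
-- def solution(S):
--     #Establishes the number of arrows required for all to face same direction
--     #Note this is the minimum amount of changes
--     direction = []
--     for i in range(0,4):
--         direction.append(0)
--
--     #counts the arrows for each possible direction
--     for arrow in S:
--         if arrow == "^":
--             direction[0] += 1
--         elif arrow == "<":
--             direction[1] += 1
--         elif arrow == ">":
--             direction[2] += 1
--         elif arrow == "v":
--             direction[3] += 1
--
--     #We now sort the direction list to get the modal direction
--     direction.sort(reverse=True)
--     changes = len(S) - direction[0] #the length of the string minus the modal direction gives the minimum amount of changes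
--     return changes
-- ===== SOURCE B (Python) =====
-- def solution(S):
--     # Try each of the four target directions: the cost of aligning everything to
--     # `target` is the number of characters that differ from it; return the cheapest.
--     best = None
--     for target in "^<>v":
--         cost = 0
--         for ch in S:
--             if ch != target:
--                 cost += 1
--         if best is None or cost < best:
--             best = cost
--     return best
-- ===== Notes on version B (the rewrite author's own statement) =====
-- stated objective: alternative
-- what changed: Instead of tallying arrow frequencies into a 4-slot table and sorting to find the mode, B brute-forces the four possible target directions, counts the mismatches against each target, and returns the minimum cost.
import Mathlib
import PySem

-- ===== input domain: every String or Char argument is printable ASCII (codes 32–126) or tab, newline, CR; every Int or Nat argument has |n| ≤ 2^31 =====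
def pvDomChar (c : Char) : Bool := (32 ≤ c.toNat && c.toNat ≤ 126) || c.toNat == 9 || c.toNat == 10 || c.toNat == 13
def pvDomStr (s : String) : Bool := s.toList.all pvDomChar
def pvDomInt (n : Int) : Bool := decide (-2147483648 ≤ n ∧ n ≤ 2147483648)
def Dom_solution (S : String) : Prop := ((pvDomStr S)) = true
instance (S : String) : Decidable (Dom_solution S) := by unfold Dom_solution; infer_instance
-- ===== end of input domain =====

-- B replaces A's tally-table-then-sort with a search over the four target directions,
-- returning the minimal mismatch count (alternative decomposition, same O(n) cost).

-- ===== PORT A =====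
def solution (S : String) : Int :=
  -- direction = []; for i in range(0,4): direction.append(0)
  let direction : List Int := (PySem.List.pyRange 0 4 1).foldl (fun d _ => d ++ [(0 : Int)]) []
  -- for arrow in S: tally into the 4-slot table (indices always in range: len = 4)
  let direction := S.toList.foldl (fun d arrow =>
    if arrow == '^' then PySem.List.pySetD d 0 (PySem.List.pyGetD d 0 0 + 1)
    else if arrow == '<' then PySem.List.pySetD d 1 (PySem.List.pyGetD d 1 0 + 1)
    else if arrow == '>' then PySem.List.pySetD d 2 (PySem.List.pyGetD d 2 0 + 1)
    else if arrow == 'v' then PySem.List.pySetD d 3 (PySem.List.pyGetD d 3 0 + 1)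
    else d) direction
  -- direction.sort(reverse=True); changes = len(S) - direction[0]
  let direction := PySem.List.sorted direction (fun x => x) true
  (S.toList.length : Int) - PySem.List.pyGetD direction 0 0

-- ===== PORT B =====
-- the body of B's outer loop: count mismatches against `target`, keep the cheapest so far
def pvBestStep (S : String) (best : Option Int) (target : Char) : Option Int :=
  let cost := S.toList.foldl (fun cost ch => if ch != target then cost + 1 else cost) (0 : Int)
  match best with
  | none => some cost
  | some b => if cost < b then some cost else some b

def solution_alt (S : String) : Int :=
  -- best = None; for target in "^<>v": count mismatches, keep the cheapest
  let best := ['^', '<', '>', 'v'].foldl (pvBestStep S) none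
  -- the loop body runs four times, so best is always set
  best.getD 0

-- ===== PRECONDITION & SPEC =====
def Spec_solution (S : String) (out : Int) : Prop := out = solution_alt S
instance (S : String) (out : Int) : Decidable (Spec_solution S out) := by unfold Spec_solution; infer_instance

-- ===== CLAIM (what is proved, stated in full; the proofs are below) =====
def Claim_equal_solution : Prop := ∀ (S : String), Dom_solution S → Spec_solution S (solution S)

-- ===== LEMMAS AND PROOFS =====

-- reduction equations for B's loop body
theorem bestStep_none (S : String) (t : Char) :
    pvBestStep S none t
      = some (S.toList.foldl (fun cost ch => if ch != t then cost + 1 else cost) 0) := rfl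

theorem bestStep_some (S : String) (b : Int) (t : Char) :
    pvBestStep S (some b) t
      = if S.toList.foldl (fun cost ch => if ch != t then cost + 1 else cost) 0 < b
        then some (S.toList.foldl (fun cost ch => if ch != t then cost + 1 else cost) 0)
        else some b := rfl

-- B's inner loop counts the characters differing from the target
theorem mismatch_loop (l : List Char) (t : Char) (acc : Int) :
    l.foldl (fun cost ch => if ch != t then cost + 1 else cost) acc
      = acc + l.length - l.count t := by
  induction l generalizing acc with
  | nil => simp
  | cons x s ih =>
    simp only [List.foldl_cons, List.count_cons, List.length_cons]
    by_cases h : x = t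
    · subst h; rw [if_neg (by simp)]; rw [ih]; simp; ring
    · rw [if_pos (by simp [h])]; rw [ih]; simp [h]; ring

-- A's tally loop computes the four per-direction counts
theorem tally_loop (l : List Char) (a b c d : Int) :
    l.foldl (fun d' arrow =>
      if arrow == '^' then PySem.List.pySetD d' 0 (PySem.List.pyGetD d' 0 0 + 1)
      else if arrow == '<' then PySem.List.pySetD d' 1 (PySem.List.pyGetD d' 1 0 + 1)
      else if arrow == '>' then PySem.List.pySetD d' 2 (PySem.List.pyGetD d' 2 0 + 1)
      else if arrow == 'v' then PySem.List.pySetD d' 3 (PySem.List.pyGetD d' 3 0 + 1)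
      else d') [a, b, c, d]
    = [a + l.count '^', b + l.count '<', c + l.count '>', d + l.count 'v'] := by
  induction l generalizing a b c d with
  | nil => simp
  | cons x t ih =>
    simp only [List.foldl_cons]
    by_cases h1 : x = '^'
    · subst h1
      rw [if_pos (by decide)]
      show List.foldl _ [a+1, b, c, d] t = _
      rw [ih]; simp; omega
    · by_cases h2 : x = '<'
      · subst h2
        rw [if_neg (by decide), if_pos (by decide)]
        show List.foldl _ [a, b+1, c, d] t = _
        rw [ih]; simp [h1]; omega
      · by_cases h3 : x = '>'
        · subst h3
          rw [if_neg (by decide), if_neg (by decide), if_pos (by decide)]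
          show List.foldl _ [a, b, c+1, d] t = _
          rw [ih]; simp [h1, h2]; omega
        · by_cases h4 : x = 'v'
          · subst h4
            rw [if_neg (by decide), if_neg (by decide), if_neg (by decide), if_pos (by decide)]
            show List.foldl _ [a, b, c, d+1] t = _
            rw [ih]; simp [h1, h2, h3]; omega
          · rw [if_neg (by simp [h1]), if_neg (by simp [h2]), if_neg (by simp [h3]), if_neg (by simp [h4])]
            rw [ih]; simp [h1, h2, h3, h4]

-- A's sort(reverse=True) then [0] picks the maximum of the four cells
theorem head_sorted_rev_eq_max (w x y z : Int) :
    PySem.List.pyGetD (PySem.List.sorted [w, x, y, z] (fun v => v) true) 0 0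
      = max (max (max w x) y) z := by
  cases hs : PySem.List.sorted [w, x, y, z] (fun v => v) true with
  | nil => exact absurd ((PySem.List.sorted_eq_nil_iff _ _ _).mp hs) (by simp)
  | cons m t =>
    have hperm := PySem.List.sorted_perm [w, x, y, z] (fun v => v) true
    rw [hs] at hperm
    have hmem : m ∈ [w, x, y, z] := hperm.mem_iff.mp (by simp)
    have hge := PySem.List.key_head_sorted_rev_ge _ _ hs
    have hm : PySem.List.pyGetD (m :: t) 0 0 = m := by
      simp [PySem.List.pyGetD, PySem.List.pyGet?, PySem.List.pyIdx?]
    rw [hm]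
    apply le_antisymm
    · rcases (by simpa using hmem : m = w ∨ m = x ∨ m = y ∨ m = z) with h | h | h | h <;>
        subst h <;> simp
    · exact max_le (max_le (max_le (hge w (by simp)) (hge x (by simp))) (hge y (by simp)))
        (hge z (by simp))

-- ===== VERDICT (by name: the statement is the Claim_ definition above) =====
theorem solution_spec : Claim_equal_solution := by
  unfold Claim_equal_solution
  intro S _
  unfold Spec_solution
  have hA : solution S = (S.toList.length : Int) -
      PySem.List.pyGetD (PySem.List.sorted (S.toList.foldl (fun d arrow =>
        if arrow == '^' then PySem.List.pySetD d 0 (PySem.List.pyGetD d 0 0 + 1)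
        else if arrow == '<' then PySem.List.pySetD d 1 (PySem.List.pyGetD d 1 0 + 1)
        else if arrow == '>' then PySem.List.pySetD d 2 (PySem.List.pyGetD d 2 0 + 1)
        else if arrow == 'v' then PySem.List.pySetD d 3 (PySem.List.pyGetD d 3 0 + 1)
        else d) [0, 0, 0, 0]) (fun x => x) true) 0 0 := rfl
  rw [hA, tally_loop, head_sorted_rev_eq_max]
  unfold solution_alt
  simp only [List.foldl_cons, List.foldl_nil, bestStep_none, bestStep_some, mismatch_loop,
    String.length_toList]
  split_ifs <;>
    simp only [bestStep_some, mismatch_loop, String.length_toList] <;>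
  split_ifs <;>
    simp only [bestStep_some, mismatch_loop, String.length_toList] <;>
  split_ifs <;>
    simp only [Option.getD_some] <;>
  omega
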